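-- pv_equiv track=rewrite | github.com/khunderscorehh98/B20230088_ICLassignment | search_backward.py | find_last_greater_or_equal
-- ===== SOURCE A (Python) =====
-- def find_last_greater_or_equal(numbers_list, target_number):
--     last_index = -1  # Start with -1 to show we haven't found anything yet
--
--     # Go through the list one by one using a for loop
--     for i in range(len(numbers_list)):  # i is the index of each element in the list
--         if numbers_list[i] >= target_number:  # If the current number is bigger or equal to target_number
--             last_index = i  # Remember the index of this number
--
--     # If we found a number, return its index, otherwise return None
--     if last_index != -1:
--         return last_index
--     else:
--         return None  # Return None if no match was found
-- ===== SOURCE B (Python) =====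
-- def find_last_greater_or_equal(numbers_list, target_number):
--     # Scan backward and return on the first hit from the end.
--     for i in range(len(numbers_list) - 1, -1, -1):
--         if numbers_list[i] >= target_number:
--             return i
--     return None
-- ===== Notes on version B (the rewrite author's own statement) =====
-- stated objective: idiomatic
-- what changed: Replaces the full forward scan with a running last_index sentinel by a backward scan that returns the first matching index from the end immediately.
import Mathlib
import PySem

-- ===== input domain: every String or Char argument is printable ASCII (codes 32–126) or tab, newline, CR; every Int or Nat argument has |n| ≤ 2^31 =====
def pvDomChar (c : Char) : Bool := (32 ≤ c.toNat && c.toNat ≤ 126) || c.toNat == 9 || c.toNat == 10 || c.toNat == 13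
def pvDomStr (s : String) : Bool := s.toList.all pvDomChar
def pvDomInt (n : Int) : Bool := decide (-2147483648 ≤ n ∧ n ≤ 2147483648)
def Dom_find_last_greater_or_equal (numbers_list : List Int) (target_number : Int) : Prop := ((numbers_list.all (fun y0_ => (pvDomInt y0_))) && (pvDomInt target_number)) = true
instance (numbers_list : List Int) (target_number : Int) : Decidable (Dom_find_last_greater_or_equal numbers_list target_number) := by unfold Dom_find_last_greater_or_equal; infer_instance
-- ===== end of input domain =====

-- B replaces A's forward scan with a sentinel accumulator by a backward scan returning on the first match from the end (idiomatic).
-- ===== PORT A =====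
def find_last_greater_or_equal (numbers_list : List Int) (target_number : Int) : Option Int :=
  -- last_index accumulated over i in range(len(numbers_list))
  let last_index : Int :=
    (List.range numbers_list.length).foldl
      (fun acc i => if numbers_list.getD i 0 ≥ target_number then (i : Int) else acc) (-1)
  if last_index ≠ -1 then some last_index else none

-- ===== PORT B =====
-- backward loop: altGo n examines indices n-1, n-2, …, 0 and returns on the first hit
def find_last_greater_or_equal_altGo (numbers_list : List Int) (target_number : Int) : Nat → Option Int
  | 0 => none
  | n + 1 =>
    if numbers_list.getD n 0 ≥ target_number then some (n : Int)
    else find_last_greater_or_equal_altGo numbers_list target_number n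

def find_last_greater_or_equal_alt (numbers_list : List Int) (target_number : Int) : Option Int :=
  find_last_greater_or_equal_altGo numbers_list target_number numbers_list.length

-- ===== PRECONDITION & SPEC =====
def Spec_find_last_greater_or_equal (numbers_list : List Int) (target_number : Int) (out : Option Int) : Prop := out = find_last_greater_or_equal_alt numbers_list target_number
instance (numbers_list : List Int) (target_number : Int) (out : Option Int) : Decidable (Spec_find_last_greater_or_equal numbers_list target_number out) := by unfold Spec_find_last_greater_or_equal; infer_instance

-- ===== CLAIM (what is proved, stated in full; the proofs are below) =====
def Claim_equal_find_last_greater_or_equal : Prop := ∀ (numbers_list : List Int) (target_number : Int), Dom_find_last_greater_or_equal numbers_list target_number → Spec_find_last_greater_or_equal numbers_list target_number (find_last_greater_or_equal numbers_list target_number)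

-- ===== LEMMAS AND PROOFS =====

-- ===== VERDICT (by name: the statement is the Claim_ definition above) =====
-- invariant relating A's foldl over range n to B's backward scan of the first n indices
lemma fold_eq_go (xs : List Int) (t : Int) (n : Nat) :
    (List.range n).foldl (fun acc i => if xs.getD i 0 ≥ t then (i : Int) else acc) (-1)
      = (match find_last_greater_or_equal_altGo xs t n with
         | some i => i
         | none => (-1 : Int)) := by
  induction n with
  | zero => simp [find_last_greater_or_equal_altGo]
  | succ n ih =>
    rw [List.range_succ, List.foldl_append]
    simp only [List.foldl_cons, List.foldl_nil, find_last_greater_or_equal_altGo]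
    split_ifs with h
    · simp
    · simpa using ih

lemma go_some_nonneg (xs : List Int) (t : Int) (n : Nat) (i : Int)
    (h : find_last_greater_or_equal_altGo xs t n = some i) : 0 ≤ i := by
  induction n with
  | zero => simp [find_last_greater_or_equal_altGo] at h
  | succ n ih =>
    simp only [find_last_greater_or_equal_altGo] at h
    split_ifs at h with hc
    · cases h; exact Int.natCast_nonneg n
    · exact ih h

theorem find_last_greater_or_equal_spec : Claim_equal_find_last_greater_or_equal := by
  intro xs t _
  unfold Spec_find_last_greater_or_equal find_last_greater_or_equal find_last_greater_or_equal_alt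
  rw [fold_eq_go]
  cases h : find_last_greater_or_equal_altGo xs t xs.length with
  | none => simp
  | some i =>
    have := go_some_nonneg xs t xs.length i h
    simp only []
    rw [if_pos (by omega)]
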